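-- pv_equiv track=rewrite | github.com/cedric-cnam/NeoMaPy_Daphne | MAP_Inference/Python/MAP/map_brutForce.py | list_of_subsolutions
-- ===== SOURCE A (Python) =====
-- def list_of_subsolutions(solution):
--     l = []
--     for i in range(0,len(solution)):
--         l.append([])
--         for j in range(0,len(solution)):
--             if j != i:
--                 l[i].append(solution[j])
--     return l
-- ===== SOURCE B (Python) =====
-- def list_of_subsolutions(solution):
--     return [solution[:i] + solution[i+1:] for i in range(len(solution))]
-- ===== Notes on version B (the rewrite author's own statement) =====
-- stated objective: simpler
-- what changed: B builds each leave-one-out sublist as the concatenation of the slices before and after index i, replacing A's inner scan over all indices with its j != i test and per-element appends into l[i].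
import Mathlib
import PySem

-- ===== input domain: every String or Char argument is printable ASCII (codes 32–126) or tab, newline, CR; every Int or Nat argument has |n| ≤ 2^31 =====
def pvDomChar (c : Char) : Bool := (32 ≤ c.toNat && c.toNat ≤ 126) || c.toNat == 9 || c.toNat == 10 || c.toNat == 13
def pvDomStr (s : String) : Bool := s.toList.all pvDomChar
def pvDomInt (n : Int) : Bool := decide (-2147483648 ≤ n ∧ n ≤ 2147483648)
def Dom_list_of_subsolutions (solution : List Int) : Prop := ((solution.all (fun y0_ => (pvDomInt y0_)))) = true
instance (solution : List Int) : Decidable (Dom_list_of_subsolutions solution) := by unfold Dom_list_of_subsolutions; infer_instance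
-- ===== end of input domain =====

-- B builds each leave-one-out sublist as prefix-slice ++ suffix-slice instead of A's inner
-- skip-one scan with per-element appends (objective: simpler).

-- ===== PORT A =====
-- outer loop i: l.append([]), then inner loop j appends solution[j] to l[i] when j != i.
-- solution[j] is ported as PySem.List.pyGetD solution j 0: j ranges over range(len(solution)),
-- so the index is always in range and pyGetD agrees with Python's solution[j] there.
def list_of_subsolutions (solution : List Int) : List (List Int) :=
  (List.range solution.length).foldl
    (fun l i =>
      (List.range solution.length).foldl
        (fun l j =>
          if j ≠ i then l.modify i (fun r => r ++ [PySem.List.pyGetD solution (j : Int) 0]) else l)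
        (l ++ [[]]))
    []

-- ===== PORT B =====
def list_of_subsolutions_alt (solution : List Int) : List (List Int) :=
  (List.range solution.length).map
    (fun (i : Nat) => PySem.List.slice solution none (some ((i : Int))) ++
                      PySem.List.slice solution (some ((i : Int) + 1)) none)

-- ===== PRECONDITION & SPEC =====
def Spec_list_of_subsolutions (solution : List Int) (out : List (List Int)) : Prop := out = list_of_subsolutions_alt solution
instance (solution : List Int) (out : List (List Int)) : Decidable (Spec_list_of_subsolutions solution out) := by unfold Spec_list_of_subsolutions; infer_instance

-- ===== CLAIM (what is proved, stated in full; the proofs are below) =====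
def Claim_equal_list_of_subsolutions : Prop := ∀ (solution : List Int), Dom_list_of_subsolutions solution → Spec_list_of_subsolutions solution (list_of_subsolutions solution)

-- ===== LEMMAS AND PROOFS =====

theorem pv_modify_id {α : Type} (l : List α) (i : Nat) :
    l.modify i (fun a => a) = l := by
  induction l generalizing i with
  | nil => simp
  | cons a l ih => cases i with
    | zero => rfl
    | succ i => simpa [List.modify_cons] using ih i

theorem pv_modify_modify {α : Type} (l : List α) (i : Nat) (f g : α → α) :
    (l.modify i f).modify i g = l.modify i (fun a => g (f a)) := by
  induction l generalizing i with
  | nil => simp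
  | cons a l ih => cases i with
    | zero => rfl
    | succ i => simpa [List.modify_cons] using ih i

theorem pv_modify_append_last {α : Type} (l : List α) (a : α) (f : α → α) :
    (l ++ [a]).modify l.length f = l ++ [f a] := by
  induction l with
  | nil => rfl
  | cons b l ih => simpa [List.modify_cons] using ih

-- the inner loop is a modify of the single entry at index i
theorem pv_inner_fold (g : Nat → Int) (i : Nat) (js : List Nat) (l : List (List Int)) :
    js.foldl (fun l j => if j ≠ i then l.modify i (fun r => r ++ [g j]) else l) l
    = l.modify i (fun r => js.foldl (fun r j => if j ≠ i then r ++ [g j] else r) r) := by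
  induction js generalizing l with
  | nil => simp [pv_modify_id]
  | cons j js ih =>
    by_cases h : j ≠ i
    · simp only [List.foldl_cons, if_pos h, ih, pv_modify_modify]
    · simp only [List.foldl_cons, if_neg h, ih]

theorem pv_fold_filter (g : Nat → Int) (i : Nat) (js : List Nat) (r : List Int) :
    js.foldl (fun r j => if j ≠ i then r ++ [g j] else r) r
    = r ++ (js.filter (fun j => decide (j ≠ i))).map g := by
  induction js generalizing r with
  | nil => simp
  | cons j js ih =>
    simp only [List.foldl_cons, List.filter_cons]
    by_cases h : j ≠ i
    · rw [if_pos h, ih]; simp [h]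
    · rw [if_neg h, ih]; simp [h]

theorem pv_range_filter (n i : Nat) (h : i < n) :
    (List.range n).filter (fun j => decide (j ≠ i))
    = List.range i ++ List.range' (i + 1) (n - i - 1) := by
  have hsplit : List.range n = List.range' 0 i ++ List.range' i (n - i) := by
    rw [List.range_eq_range']
    calc List.range' 0 n = List.range' 0 (i + (n - i)) := by congr 1; omega
      _ = List.range' 0 i ++ List.range' i (n - i) := by
            have := (List.range'_append (s := 0) (m := i) (n := n - i) (step := 1)).symm
            simpa using this
  have hstep : List.range' i (n - i) = i :: List.range' (i + 1) (n - i - 1) := by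
    calc List.range' i (n - i) = List.range' i ((n - i - 1) + 1) := by congr 1; omega
      _ = i :: List.range' (i + 1) (n - i - 1) := List.range'_succ ..
  rw [hsplit, hstep, List.filter_append, List.filter_cons]
  rw [List.filter_eq_self.2 (by
    intro j hj
    have hji : j < i := by simpa using hj
    simp; omega)]
  rw [List.filter_eq_self.2 (by
    intro j hj
    rw [List.mem_range'_1] at hj
    simp; omega)]
  simp [List.range_eq_range']

theorem pv_map_range_take (sol : List Int) (g : Nat → Int)
    (hg : ∀ j, (h : j < sol.length) → g j = sol[j]) (i : Nat) (h : i ≤ sol.length) :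
    (List.range i).map g = sol.take i := by
  apply List.ext_getElem
  · simp [h]
  · intro k h1 h2
    simp only [List.getElem_map, List.getElem_range, List.getElem_take]
    exact hg k (by simp at h2; omega)

theorem pv_map_range'_drop (sol : List Int) (g : Nat → Int)
    (hg : ∀ j, (h : j < sol.length) → g j = sol[j]) (i : Nat) (h : i < sol.length) :
    (List.range' (i + 1) (sol.length - i - 1)).map g = sol.drop (i + 1) := by
  apply List.ext_getElem
  · simp; omega
  · intro k h1 h2
    simp only [List.getElem_map, List.getElem_range', List.getElem_drop]
    have hk : i + 1 + 1 * k < sol.length := by simp at h1; omega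
    simp only [Nat.one_mul] at hk ⊢
    exact hg _ hk

-- value of one outer iteration's new entry
theorem pv_entry (sol : List Int) (g : Nat → Int)
    (hg : ∀ j, (h : j < sol.length) → g j = sol[j]) (i : Nat) (h : i < sol.length) :
    (List.range sol.length).foldl
      (fun r j => if j ≠ i then r ++ [g j] else r) ([] : List Int)
    = sol.take i ++ sol.drop (i + 1) := by
  rw [pv_fold_filter, pv_range_filter sol.length i h, List.nil_append, List.map_append,
      pv_map_range_take sol g hg i (le_of_lt h), pv_map_range'_drop sol g hg i h]

theorem pv_outer (sol : List Int) (g : Nat → Int)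
    (hg : ∀ j, (h : j < sol.length) → g j = sol[j]) (k : Nat) (hk : k ≤ sol.length) :
    (List.range k).foldl
      (fun l i =>
        (List.range sol.length).foldl
          (fun l j => if j ≠ i then l.modify i (fun r => r ++ [g j]) else l)
          (l ++ [[]]))
      []
    = (List.range k).map (fun i => sol.take i ++ sol.drop (i + 1)) := by
  induction k with
  | zero => simp
  | succ k ih =>
    rw [List.range_succ, List.foldl_append, List.foldl_cons, List.foldl_nil, ih (by omega),
        pv_inner_fold]
    have hlen : ((List.range k).map (fun i => sol.take i ++ sol.drop (i + 1))).length = k := by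
      simp
    have hmod := pv_modify_append_last ((List.range k).map (fun i => sol.take i ++ sol.drop (i + 1)))
      ([] : List Int)
      (fun r => (List.range sol.length).foldl (fun r j => if j ≠ k then r ++ [g j] else r) r)
    rw [hlen] at hmod
    rw [hmod, pv_entry sol g hg k (by omega), List.map_append]
    simp

-- ===== VERDICT (by name: the statement is the Claim_ definition above) =====
theorem list_of_subsolutions_spec : Claim_equal_list_of_subsolutions := by
  intro sol _
  unfold Spec_list_of_subsolutions list_of_subsolutions list_of_subsolutions_alt
  rw [pv_outer sol (fun j => PySem.List.pyGetD sol (j : Int) 0)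
        (by intro j h
            simp [PySem.List.pyGetD_natCast, List.getD_eq_getElem?_getD,
                  List.getElem?_eq_getElem h])
        sol.length le_rfl]
  apply List.map_congr_left
  intro i _
  rw [PySem.List.slice_to_natCast,
      show ((i : Int) + 1) = (((i + 1 : Nat)) : Int) by push_cast; ring,
      PySem.List.slice_from_natCast]
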